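-- pv_equiv track=rewrite | github.com/chobojajg/codequiz | 프로그래머스/0/181904. 세로 읽기/세로 읽기.py | solution
-- ===== SOURCE A (Python) =====
-- def solution(my_string, m, c):
--     lis = []
--     for i in range(len(my_string)+1):
--         if i % m == 0 and i != 0:
--             lis.append(my_string[i-m:i])
--     lis2 = []
--     for i in lis:
--         lis2.append(i[c-1])
--     return ''.join(lis2)
-- ===== SOURCE B (Python) =====
-- def solution(my_string, m, c):
--     out = []
--     for r in range(len(my_string) // m):
--         out.append(my_string[r * m + c - 1])
--     return ''.join(out)
-- ===== Notes on version B (the rewrite author's own statement) =====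
-- stated objective: simpler
-- what changed: A builds the list of m-sized row strings in one pass and then indexes each row in a second pass; B drops the row list entirely and reads the column in a single loop over the row count n = len//m via my_string[r*m + c - 1].
-- outside the precondition, e.g. on solution('abcd', 2, 0): A returns 'bd', B returns 'db'; on solution('abcdef', 3, -1): A returns 'be', B returns 'eb'
import Mathlib
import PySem

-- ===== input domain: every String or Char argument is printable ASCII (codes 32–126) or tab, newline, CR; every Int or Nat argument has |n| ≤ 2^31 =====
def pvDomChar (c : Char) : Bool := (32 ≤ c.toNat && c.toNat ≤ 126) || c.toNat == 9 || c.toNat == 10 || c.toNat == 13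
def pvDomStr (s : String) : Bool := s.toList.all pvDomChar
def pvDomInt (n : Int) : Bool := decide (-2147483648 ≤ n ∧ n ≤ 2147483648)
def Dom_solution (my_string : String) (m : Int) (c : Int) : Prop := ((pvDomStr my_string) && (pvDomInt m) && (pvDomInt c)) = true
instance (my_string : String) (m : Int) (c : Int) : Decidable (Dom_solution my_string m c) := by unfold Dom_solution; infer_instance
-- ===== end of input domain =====

-- B replaces A's two passes (build the list of m-sized rows, then index each row) by one loop over
-- the row count n = len//m that reads my_string[r*m + c - 1] directly; objective: simpler.

-- ===== PORT A =====
-- ''.join of the one-character strings row[c-1] is ported as the string of the collected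
-- characters (exact: each joined piece is a single character).
def solution (my_string : String) (m : Int) (c : Int) : String :=
  let s := my_string.toList
  let lis : List (List Char) :=
    (PySem.List.pyRange 0 (PySem.Str.len my_string + 1) 1).foldl
      (fun lis i =>
        if PySem.Int.mod i m == 0 && i != 0 then
          lis ++ [PySem.List.slice s (some (i - m)) (some i)]
        else lis) []
  let lis2 : List Char :=
    lis.foldl (fun lis2 row => lis2 ++ [PySem.List.pyGetD row (c - 1) ' ']) []
  String.ofList lis2

-- ===== PORT B =====
def solution_alt (my_string : String) (m : Int) (c : Int) : String :=
  let s := my_string.toList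
  let out : List Char :=
    (PySem.List.pyRange 0 (PySem.Int.floordiv (PySem.Str.len my_string) m) 1).foldl
      (fun out r => out ++ [PySem.List.pyGetD s (r * m + c - 1) ' ']) []
  String.ofList out

-- ===== PRECONDITION & SPEC =====
-- Pre_ excludes m = 0 (ZeroDivisionError), m < 0 with len ≥ -m (IndexError on an empty row),
-- c out of a row's range with at least one full row (IndexError), and the corner m > 0,
-- len ≥ m, 1-m ≤ c ≤ 0, where A's value comes from Python's negative-index wraparound inside
-- each row while B reads a different accidental position — both values are artefacts nobody
-- would specify.
def Pre_solution (my_string : String) (m : Int) (c : Int) : Prop :=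
  (0 < m ∧ (PySem.Str.len my_string < m ∨ (1 ≤ c ∧ c ≤ m))) ∨
  (m < 0 ∧ PySem.Str.len my_string < -m)
instance (my_string : String) (m : Int) (c : Int) : Decidable (Pre_solution my_string m c) := by
  unfold Pre_solution; infer_instance
def pvWitness_solution : String × Int × Int := ("abcdef", 2, 2)

def Spec_solution (my_string : String) (m : Int) (c : Int) (out : String) : Prop := out = solution_alt my_string m c
instance (my_string : String) (m : Int) (c : Int) (out : String) : Decidable (Spec_solution my_string m c out) := by unfold Spec_solution; infer_instance

-- ===== CLAIM (what is proved, stated in full; the proofs are below) =====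
def Claim_equal_solution : Prop := ∀ (my_string : String) (m : Int) (c : Int), Dom_solution my_string m c → Pre_solution my_string m c → Spec_solution my_string m c (solution my_string m c)

-- ===== LEMMAS AND PROOFS =====

-- the multiples of M in [1, L] are exactly (j+1)*M for j < L/M
lemma filt_range (M L : Nat) (hM : 0 < M) :
    (List.range (L+1)).filter (fun k => decide (M ∣ k) && !(k == 0))
      = (List.range (L / M)).map (fun j => (j + 1) * M) := by
  induction L with
  | zero => simp [List.range_succ, Nat.div_eq_of_lt hM]
  | succ L ih =>
    rw [List.range_succ, List.filter_append, ih]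
    by_cases h : M ∣ (L+1)
    · have hq : (L+1)/M = L/M + 1 := by rw [Nat.succ_div]; simp [h]
      have he : (L/M + 1) * M = L + 1 := by
        have h2 := Nat.div_mul_cancel h
        rw [hq] at h2; exact h2
      rw [hq, List.range_succ, List.map_append]
      simp [h, he]
    · have hq : (L+1)/M = L/M := by rw [Nat.succ_div]; simp [h]
      rw [hq]; simp [h]

-- A's loop guard 'i % m == 0 and i != 0', read at a natural number k, is divisibility by M
lemma mod_pred_cast (k M : Nat) :
    ((PySem.Int.mod (k : Int) (M : Int) == 0 && ((k : Int) != 0)))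
      = (decide (M ∣ k) && !(k == 0)) := by
  have h1 : M ∣ k ↔ k % M = 0 := Nat.dvd_iff_mod_eq_zero
  have h2 : PySem.Int.mod (k : Int) (M : Int) = ((k % M : Nat) : Int) := by
    simp [PySem.Int.mod_natCast]
  rw [h2]
  by_cases h : M ∣ k <;> by_cases hk : k = 0 <;> simp_all [bne, Int.natCast_dvd_natCast]

-- len(my_string) // m is not positive when m < 0 and the length is non-negative
lemma floordiv_nonpos_of_neg (L m : Int) (hm : m < 0) (hL : 0 ≤ L) :
    PySem.Int.floordiv L m ≤ 0 := by
  by_contra hcon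
  have h1 := PySem.Int.floordiv_mul_add_mod L m
  have h2 := PySem.Int.mod_neg_bounds (a := L) hm
  have h3 : PySem.Int.floordiv L m * m ≤ 1 * m :=
    mul_le_mul_of_nonpos_right (by omega) (le_of_lt hm)
  omega

lemma solution_eq_alt (my_string : String) (m : Int) (c : Int)
    (hpre : Pre_solution my_string m c) :
    solution my_string m c = solution_alt my_string m c := by
  unfold Pre_solution at hpre
  unfold solution solution_alt
  rw [PySem.Str.len_eq] at hpre ⊢
  set s := my_string.toList with hs
  set L := s.length with hL
  simp only []
  rw [PySem.List.foldl_append_if, PySem.List.foldl_append_singleton_eq_map,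
      PySem.List.foldl_append_singleton_eq_map]
  simp only [List.nil_append, List.map_map]
  refine congrArg String.ofList ?_
  rcases hpre with ⟨hm, hdisj⟩ | ⟨hm, hlen⟩
  · -- m > 0: both sides are the column chars s[j*m + c-1] for j < L/m
    obtain ⟨M, rfl⟩ : ∃ M : Nat, m = (M : Int) := ⟨m.toNat, (Int.toNat_of_nonneg hm.le).symm⟩
    have hM : 0 < M := by exact_mod_cast hm
    rw [PySem.Int.floordiv_natCast, PySem.List.pyRange_one, PySem.List.pyRange_one]
    simp only [zero_add, sub_zero, Int.toNat_natCast]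
    have hT : ((L : Int) + 1).toNat = L + 1 := by omega
    rw [hT, List.filter_map]
    have hpred : ((fun i : Int => PySem.Int.mod i (M:Int) == 0 && (i != 0)) ∘ (fun k : Nat => (k : Int)))
        = (fun k : Nat => decide (M ∣ k) && !(k == 0)) := by
      funext k; exact mod_pred_cast k M
    rw [hpred, filt_range M L hM]
    simp only [List.map_map]
    apply List.map_congr_left
    intro j hj
    have hj' : j < L / M := List.mem_range.mp hj
    have hc : 1 ≤ c ∧ c ≤ (M : Int) := by
      rcases hdisj with h | h
      · exfalso
        have hLM : L < M := by exact_mod_cast h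
        rw [Nat.div_eq_of_lt hLM] at hj'; omega
      · exact h
    have hrow : (j + 1) * M ≤ L := by
      calc (j + 1) * M ≤ (L / M) * M := Nat.mul_le_mul_right M (by omega)
        _ ≤ L := Nat.div_mul_le_self L M
    have hsm : (j + 1) * M = j * M + M := by ring
    simp only [Function.comp]
    have e1 : (((j + 1) * M : Nat) : Int) - (M : Int) = ((j * M : Nat) : Int) := by
      push_cast; ring
    rw [e1, PySem.List.slice_natCast]
    have e2 : (j + 1) * M - j * M = M := by omega
    rw [e2]
    have hrl : ((s.drop (j * M)).take M).length = M := by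
      simp [List.length_take, List.length_drop]; omega
    have hc1 : (0:Int) ≤ c - 1 := by omega
    have hc2 : c - 1 < (((s.drop (j * M)).take M).length : Int) := by rw [hrl]; omega
    rw [PySem.List.pyGetD_eq_getElem _ _ hc1 hc2]
    have hidx : j * M + (c - 1).toNat < L := by omega
    have e3 : (j : Int) * (M : Int) + c - 1 = ((j * M + (c - 1).toNat : Nat) : Int) := by
      push_cast [Int.toNat_of_nonneg hc1]; ring
    rw [e3, PySem.List.pyGetD_eq_getElem _ _ (by positivity) (by exact_mod_cast hidx)]
    have hti : ((j * M + (c - 1).toNat : Nat) : Int).toNat = j * M + (c - 1).toNat := by omega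
    simp only [List.getElem_take, List.getElem_drop, hti]
  · -- m < 0 with len < -m: A collects no rows, B's row count is not positive
    have hfilt : (PySem.List.pyRange 0 ((L : Int) + 1) 1).filter
        (fun i => PySem.Int.mod i m == 0 && (i != 0)) = [] := by
      rw [List.filter_eq_nil_iff]
      intro i hi hp
      have hmem : 0 ≤ i ∧ i < (L : Int) + 1 := by
        have := PySem.List.mem_pyRange_one.mp hi
        omega
      simp only [Bool.and_eq_true, beq_iff_eq, bne_iff_ne] at hp
      have hdvd : m ∣ i := (PySem.Int.mod_eq_zero_iff_dvd i m).mp hp.1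
      have hdvd' : -m ∣ i := (Int.neg_dvd).mpr hdvd
      have hipos : 0 < i := by omega
      have := Int.le_of_dvd hipos hdvd'
      omega
    have hdiv : PySem.Int.floordiv (L : Int) m ≤ 0 :=
      floordiv_nonpos_of_neg _ _ hm (by positivity)
    rw [hfilt, PySem.List.pyRange_one_eq_nil hdiv]
    simp

-- ===== VERDICT (by name: the statement is the Claim_ definition above) =====
theorem solution_spec : Claim_equal_solution := by
  intro my_string m c _ hpre
  unfold Spec_solution
  exact solution_eq_alt my_string m c hpre
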